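-- pv_equiv track=rewrite | github.com/yuting-NCHU/color-transfer-hw | 4107056005-assign-02-element.py | cobidic
-- ===== SOURCE A (Python) =====
-- import math
--
-- def C(n, k):
--     if n<k: return 0
--     if n==k: return 1
--     if k==1: return n
--     f = math.factorial
--     return f(n) // f(k) // f(n-k)
--
-- def cobidic(n, k, m):
--     c=[]
--     R=m
--     s=n-1
--     for x in range(k,0,-1):
--         for i in range(s,k-2,-1):
--             if C(i,x) <= R:
--                 k-=1
--                 s=i
--                 R-=C(i,x)
--                 c.append(i)
--                 break
--     return c
-- ===== SOURCE B (Python) =====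
-- import math
--
-- def cobidic(n, k, m):
--     # greedy combinadic: binary search for the largest i with C(i,x) <= R
--     if m < 0 or n < k:
--         return []
--     c = []
--     R = m
--     s = n - 1
--     for x in range(k, 0, -1):
--         lo, hi = x - 1, s
--         while lo < hi:
--             mid = (lo + hi + 1) // 2
--             if math.comb(mid, x) <= R:
--                 lo = mid
--             else:
--                 hi = mid - 1
--         c.append(lo)
--         R -= math.comb(lo, x)
--         s = lo
--     return c
-- ===== Notes on version B (the rewrite author's own statement) =====
-- stated objective: faster
-- what changed: Replaces A's descending linear scan with factorial-based binomials by a binary search for the largest i with C(i,x)<=R per step (using math.comb), after handling the degenerate m<0 / n<k cases that make A's inner loop never fire.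
import Mathlib
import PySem

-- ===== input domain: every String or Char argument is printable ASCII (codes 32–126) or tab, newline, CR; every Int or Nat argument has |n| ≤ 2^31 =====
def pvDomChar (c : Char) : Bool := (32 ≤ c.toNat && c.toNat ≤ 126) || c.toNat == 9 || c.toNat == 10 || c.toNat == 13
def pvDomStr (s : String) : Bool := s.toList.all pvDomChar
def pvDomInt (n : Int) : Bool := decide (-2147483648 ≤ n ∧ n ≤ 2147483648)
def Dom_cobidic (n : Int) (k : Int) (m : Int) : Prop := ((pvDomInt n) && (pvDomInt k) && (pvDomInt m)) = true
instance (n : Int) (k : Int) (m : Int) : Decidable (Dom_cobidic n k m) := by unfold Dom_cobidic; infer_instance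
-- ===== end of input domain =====

-- B replaces A's descending linear scan (factorial-based binomials) by a per-step binary
-- search for the largest i with C(i,x) <= R; objective: faster (asymptotically fewer and
-- cheaper binomial evaluations).

-- ===== PORT A =====
-- math.factorial; A only reaches it with positive arguments (C's guards), where toNat is exact
def intFact (a : Int) : Int := (a.toNat.factorial : Int)

def pyC (a b : Int) : Int :=
  if a < b then 0
  else if a = b then 1
  else if b = 1 then a
  else PySem.Int.floordiv (PySem.Int.floordiv (intFact a) (intFact b)) (intFact (a - b))

-- one outer-loop iteration of A: state (c, R, s, k); inner for-loop-with-break = find?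
def cobidicStep (st : List Int × Int × Int × Int) (x : Int) : List Int × Int × Int × Int :=
  match (PySem.List.pyRange st.2.2.1 (st.2.2.2 - 2) (-1)).find? (fun i => decide (pyC i x ≤ st.2.1)) with
  | some i => (st.1 ++ [i], st.2.1 - pyC i x, i, st.2.2.2 - 1)
  | none => st

def cobidic (n : Int) (k : Int) (m : Int) : List Int :=
  ((PySem.List.pyRange k 0 (-1)).foldl cobidicStep ([], m, n - 1, k)).1

-- ===== PORT B =====
-- math.comb; B only calls it with 0 ≤ b and b - 1 ≤ a, where toNat is exact
def combI (a b : Int) : Int := (Nat.choose a.toNat b.toNat : Int)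

-- B's while-loop: largest i in [lo, hi] with comb(i,x) <= R (given comb(lo,x) <= R)
def bsearch (x R lo hi : Int) : Int :=
  if _h : lo < hi then
    let mid := PySem.Int.floordiv (lo + hi + 1) 2
    if combI mid x ≤ R then bsearch x R mid hi else bsearch x R lo (mid - 1)
  else lo
termination_by (hi - lo).toNat
decreasing_by
  · have h2 := PySem.Int.floordiv_two_mid_bounds (lo := lo + 1) (hi := hi) (by omega)
    simp only [show (lo + 1) + hi = lo + hi + 1 by ring] at h2
    omega
  · have h2 := PySem.Int.floordiv_two_mid_bounds (lo := lo + 1) (hi := hi) (by omega)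
    simp only [show (lo + 1) + hi = lo + hi + 1 by ring] at h2
    omega

-- B's for-loop over x = k, k-1, …, 1, building the result front-to-back
def altGo (R s x : Int) : List Int :=
  if _h : 0 < x then
    let i := bsearch x R (x - 1) s
    i :: altGo (R - combI i x) i (x - 1)
  else []
termination_by x.toNat
decreasing_by omega

def cobidic_alt (n : Int) (k : Int) (m : Int) : List Int :=
  if m < 0 ∨ n < k then [] else altGo m (n - 1) k

-- ===== PRECONDITION & SPEC =====
def Spec_cobidic (n : Int) (k : Int) (m : Int) (out : List Int) : Prop := out = cobidic_alt n k m
instance (n : Int) (k : Int) (m : Int) (out : List Int) : Decidable (Spec_cobidic n k m out) := by unfold Spec_cobidic; infer_instance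

-- ===== CLAIM (what is proved, stated in full; the proofs are below) =====
def Claim_equal_cobidic : Prop := ∀ (n : Int) (k : Int) (m : Int), Dom_cobidic n k m → Spec_cobidic n k m (cobidic n k m)

-- ===== LEMMAS AND PROOFS =====

theorem intFact_pos (a : Int) : 0 < intFact a := by
  unfold intFact; exact_mod_cast a.toNat.factorial_pos

theorem pyC_nonneg {a b : Int} (_hb : 1 ≤ b) : 0 ≤ pyC a b := by
  unfold pyC
  split_ifs with h1 h2 h3
  · exact le_refl 0
  · exact zero_le_one
  · omega
  · rw [PySem.Int.floordiv_eq_ediv_of_pos (intFact_pos _),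
        PySem.Int.floordiv_eq_ediv_of_pos (intFact_pos _)]
    exact Int.ediv_nonneg (Int.ediv_nonneg (le_of_lt (intFact_pos _)) (le_of_lt (intFact_pos _)))
      (le_of_lt (intFact_pos _))

theorem pyC_eq_combI {a b : Int} (hb : 1 ≤ b) (hab : b - 1 ≤ a) : pyC a b = combI a b := by
  unfold pyC combI
  split_ifs with h1 h2 h3
  · -- a < b, so a = b - 1 and the binomial is 0
    have : a.toNat < b.toNat := by omega
    rw [Nat.choose_eq_zero_of_lt this]; simp
  · -- a = b
    subst h2; rw [Nat.choose_self]; simp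
  · -- b = 1, a > 1
    subst h3; simp only [Int.toNat_one, Nat.choose_one_right]; omega
  · -- 2 ≤ b < a : factorial formula
    have hba : b.toNat ≤ a.toNat := by omega
    have hsub : (a - b).toNat = a.toNat - b.toNat := by omega
    unfold intFact
    rw [hsub, PySem.Int.floordiv_natCast, PySem.Int.floordiv_natCast]
    have key := Nat.choose_mul_factorial_mul_factorial hba
    have h4 : a.toNat.factorial / b.toNat.factorial
        = a.toNat.choose b.toNat * (a.toNat - b.toNat).factorial := by
      rw [← key]; rw [show a.toNat.choose b.toNat * b.toNat.factorial * (a.toNat - b.toNat).factorial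
            = (a.toNat.choose b.toNat * (a.toNat - b.toNat).factorial) * b.toNat.factorial by ring]
      exact Nat.mul_div_cancel _ b.toNat.factorial_pos
    rw [h4, Nat.mul_div_cancel _ (a.toNat - b.toNat).factorial_pos]

theorem combI_mono {i j : Int} (x : Int) (hij : i ≤ j) : combI i x ≤ combI j x := by
  unfold combI
  exact_mod_cast Nat.choose_le_choose x.toNat (by omega : i.toNat ≤ j.toNat)

theorem combI_pred {x : Int} (hx : 1 ≤ x) : combI (x - 1) x = 0 := by
  unfold combI
  rw [Nat.choose_eq_zero_of_lt (by omega : (x - 1).toNat < x.toNat)]; simp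

theorem bsearch_spec (x R : Int) (lo hi : Int) (hlo : 0 ≤ lo) (hlohi : lo ≤ hi)
    (hPlo : combI lo x ≤ R) :
    lo ≤ bsearch x R lo hi ∧ bsearch x R lo hi ≤ hi ∧ combI (bsearch x R lo hi) x ≤ R ∧
      ∀ j, bsearch x R lo hi < j → j ≤ hi → ¬ combI j x ≤ R := by
  rw [bsearch]
  by_cases h : lo < hi
  · rw [dif_pos h]
    have hb := PySem.Int.floordiv_two_mid_bounds (lo := lo + 1) (hi := hi) (by omega)
    simp only [show (lo + 1) + hi = lo + hi + 1 by ring] at hb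
    by_cases hcomb : combI (PySem.Int.floordiv (lo + hi + 1) 2) x ≤ R
    · simp only [hcomb, if_pos]
      obtain ⟨h1, h2, h3, h4⟩ :=
        bsearch_spec x R (PySem.Int.floordiv (lo + hi + 1) 2) hi (by omega) (by omega) hcomb
      exact ⟨by omega, h2, h3, h4⟩
    · simp only [hcomb, if_false]
      obtain ⟨h1, h2, h3, h4⟩ :=
        bsearch_spec x R lo (PySem.Int.floordiv (lo + hi + 1) 2 - 1) hlo (by omega) hPlo
      refine ⟨h1, by omega, h3, ?_⟩
      intro j hj1 hj2
      by_cases hjm : j ≤ PySem.Int.floordiv (lo + hi + 1) 2 - 1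
      · exact h4 j hj1 hjm
      · intro hc
        exact hcomb (le_trans (combI_mono x (by omega)) hc)
  · rw [dif_neg h]
    refine ⟨le_refl _, by omega, hPlo, ?_⟩
    intro j hj1 hj2
    exact absurd (by omega : (1:Int) = 0) (by norm_num)
termination_by (hi - lo).toNat
decreasing_by
  · have h2 := PySem.Int.floordiv_two_mid_bounds (lo := lo + 1) (hi := hi) (by omega)
    simp only [show (lo + 1) + hi = lo + hi + 1 by ring] at h2
    omega
  · have h2 := PySem.Int.floordiv_two_mid_bounds (lo := lo + 1) (hi := hi) (by omega)
    simp only [show (lo + 1) + hi = lo + hi + 1 by ring] at h2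
    omega

theorem find?_desc_range (p : Int → Bool) (e b : Int) : ∀ s : Int, b ≤ s → e < b → p b = true →
    (∀ j, b < j → j ≤ s → p j = false) →
    (PySem.List.pyRange s e (-1)).find? p = some b := by
  intro s
  induction hn : (s - b).toNat generalizing s with
  | zero =>
    intro hbs he hP hN
    have hsb : s = b := by omega
    rw [hsb, PySem.List.pyRange_neg_one_cons (by omega : e < b)]
    simp [List.find?, hP]
  | succ t ih =>
    intro hbs he hP hN
    have hbs' : b < s := by omega
    rw [PySem.List.pyRange_neg_one_cons (by omega : e < s)]
    rw [List.find?_cons_of_neg (by simp [hN s hbs' (le_refl s)])]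
    exact ih (s - 1) (by omega) (by omega) (by omega) hP (fun j h1 h2 => hN j h1 (by omega))

-- degenerate runs of A's loop: the state never changes
theorem foldl_step_neg : ∀ (l : List Int) (st : List Int × Int × Int × Int),
    (∀ x ∈ l, 1 ≤ x) → st.2.1 < 0 → l.foldl cobidicStep st = st := by
  intro l
  induction l with
  | nil => intro st _ _; rfl
  | cons x l ih =>
    intro st hmem hneg
    have hstep : cobidicStep st x = st := by
      unfold cobidicStep
      rw [List.find?_eq_none.mpr ?_]
      intro i _
      simp only [decide_eq_true_eq]
      have := pyC_nonneg (a := i) (hmem x (List.mem_cons_self))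
      omega
    rw [List.foldl_cons, hstep]
    exact ih st (fun y hy => hmem y (List.mem_cons_of_mem _ hy)) hneg

theorem foldl_step_empty : ∀ (l : List Int) (st : List Int × Int × Int × Int),
    st.2.2.1 ≤ st.2.2.2 - 2 → l.foldl cobidicStep st = st := by
  intro l
  induction l with
  | nil => intro st _; rfl
  | cons x l ih =>
    intro st hle
    have hstep : cobidicStep st x = st := by
      unfold cobidicStep
      rw [PySem.List.pyRange_neg_one_eq_nil hle]
      rfl
    rw [List.foldl_cons, hstep]
    exact ih st hle

-- the main loop: when all steps succeed, A's fold produces exactly B's recursion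
theorem loop_eq : ∀ (t : Nat) (c0 : List Int) (R s : Int), 0 ≤ R → (t : Int) - 1 ≤ s →
    ((PySem.List.pyRange (t : Int) 0 (-1)).foldl cobidicStep (c0, R, s, (t : Int))).1
      = c0 ++ altGo R s (t : Int) := by
  intro t
  induction t with
  | zero =>
    intro c0 R s _ _
    rw [PySem.List.pyRange_neg_one_eq_nil (by omega), altGo]
    simp
  | succ t ih =>
    intro c0 R s hR hs
    have ht : ((t + 1 : Nat) : Int) = (t : Int) + 1 := by push_cast; ring
    rw [ht] at hs ⊢
    have hspec := bsearch_spec ((t : Int) + 1) R (t : Int) s (by omega) (by omega)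
      (by have h0 := combI_pred (x := (t : Int) + 1) (by omega)
          rw [show (t : Int) + 1 - 1 = (t : Int) by ring] at h0
          omega)
    obtain ⟨hb1, hb2, hb3, hb4⟩ := hspec
    set b := bsearch ((t : Int) + 1) R (t : Int) s with hbdef
    have hfind : (PySem.List.pyRange s ((t : Int) + 1 - 2) (-1)).find?
        (fun i => decide (pyC i ((t : Int) + 1) ≤ R)) = some b := by
      apply find?_desc_range _ _ _ _ hb2 (by omega)
      · simp only [decide_eq_true_eq]
        rw [pyC_eq_combI (by omega) (by omega)]; exact hb3
      · intro j hj1 hj2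
        simp only [decide_eq_false_iff_not]
        rw [pyC_eq_combI (by omega) (by omega)]
        exact hb4 j hj1 hj2
    rw [PySem.List.pyRange_neg_one_cons (by omega : (0 : Int) < (t : Int) + 1)]
    rw [List.foldl_cons]
    have hstep : cobidicStep (c0, R, s, (t : Int) + 1) ((t : Int) + 1)
        = (c0 ++ [b], R - combI b ((t : Int) + 1), b, (t : Int)) := by
      unfold cobidicStep
      simp only [hfind]
      rw [pyC_eq_combI (by omega) (by omega)]
      simp
    rw [hstep]
    have halt : altGo R s ((t : Int) + 1)
        = b :: altGo (R - combI b ((t : Int) + 1)) b (t : Int) := by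
      rw [altGo]
      simp only [dif_pos (by omega : (0 : Int) < (t : Int) + 1)]
      rw [show (t : Int) + 1 - 1 = (t : Int) by ring]
    rw [show ((t : Int) + 1 - 1) = (t : Int) by ring]
    rw [ih (c0 ++ [b]) (R - combI b ((t : Int) + 1)) b (by omega) (by omega)]
    rw [halt]
    simp

-- ===== VERDICT (by name: the statement is the Claim_ definition above) =====
theorem cobidic_spec : Claim_equal_cobidic := by
  unfold Claim_equal_cobidic Spec_cobidic
  intro n k m _
  unfold cobidic cobidic_alt
  by_cases hm : m < 0
  · rw [foldl_step_neg _ _ (fun x hx => ((PySem.List.mem_pyRange_neg_one).mp hx).1) hm]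
    rw [if_pos (Or.inl hm)]
  · by_cases hnk : n < k
    · rw [foldl_step_empty _ _ (by simp; omega)]
      rw [if_pos (Or.inr hnk)]
    · rw [if_neg (by omega)]
      by_cases hk : k ≤ 0
      · rw [PySem.List.pyRange_neg_one_eq_nil (by omega)]
        rw [altGo, dif_neg (by omega : ¬ (0 : Int) < k)]
        rfl
      · have hkt : ((k.toNat : Nat) : Int) = k := by omega
        have := loop_eq k.toNat [] m (n - 1) (by omega) (by omega)
        rw [hkt] at this
        rw [this]
        simp
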